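-- pv_equiv track=rewrite | github.com/Francescoleonelli84/Air-Quality-Webapps | Gradio/app.py | check_average_air_quality
-- ===== SOURCE A (Python) =====
-- def check_average_air_quality(component_statuses):
--     # Assume that the best possible quality is "Good"
--     worst_status_level = 0
--     # Iterate over the individual component statuses and increments of 1 the counter for every exceeded limit
--     for status in component_statuses:
--         if status == 'Moderate' and worst_status_level < 1:
--             worst_status_level = 1
--         elif status == 'Poor':
--             worst_status_level = 2
--     if worst_status_level == 0:
--         return "<span style=color:green;>Good</span></p>"
--     elif worst_status_level == 1:
--         return "<span style=color:orange;>Moderate</span></p>"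
--     else:
--         return "<span style=color:red;>Poor</span></p>"
-- ===== SOURCE B (Python) =====
-- def check_average_air_quality(component_statuses):
--     if 'Poor' in component_statuses:
--         return "<span style=color:red;>Poor</span></p>"
--     if 'Moderate' in component_statuses:
--         return "<span style=color:orange;>Moderate</span></p>"
--     return "<span style=color:green;>Good</span></p>"
-- ===== Notes on version B (the rewrite author's own statement) =====
-- stated objective: idiomatic
-- what changed: Replaced the single pass that maintains a numeric worst-level accumulator with short-circuiting membership tests ('Poor' first, then 'Moderate'), which express the precedence directly.
import Mathlib
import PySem

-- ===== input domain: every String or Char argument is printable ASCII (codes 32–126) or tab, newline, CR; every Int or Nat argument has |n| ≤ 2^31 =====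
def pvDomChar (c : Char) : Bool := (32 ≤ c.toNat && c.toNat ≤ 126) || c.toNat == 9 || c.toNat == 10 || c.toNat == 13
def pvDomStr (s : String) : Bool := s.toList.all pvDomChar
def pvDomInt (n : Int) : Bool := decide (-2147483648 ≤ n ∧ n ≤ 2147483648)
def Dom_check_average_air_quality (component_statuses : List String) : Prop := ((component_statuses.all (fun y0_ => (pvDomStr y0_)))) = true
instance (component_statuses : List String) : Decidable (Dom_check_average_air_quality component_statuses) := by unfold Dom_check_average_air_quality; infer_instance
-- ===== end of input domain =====

-- B replaces A's numeric worst-level accumulator loop with short-circuiting membership tests ('Poor' first, then 'Moderate'); idiomatic, same cost.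

-- ===== PORT A =====
-- the loop body of A: update the running worst level for one status
def pvStepA (worst : Int) (status : String) : Int :=
  if status = "Moderate" ∧ worst < 1 then 1
  else if status = "Poor" then 2
  else worst

def check_average_air_quality (component_statuses : List String) : String :=
  let worst_status_level := component_statuses.foldl pvStepA 0
  if worst_status_level = 0 then "<span style=color:green;>Good</span></p>"
  else if worst_status_level = 1 then "<span style=color:orange;>Moderate</span></p>"
  else "<span style=color:red;>Poor</span></p>"

-- ===== PORT B =====
def check_average_air_quality_alt (component_statuses : List String) : String :=
  if component_statuses.contains "Poor" then "<span style=color:red;>Poor</span></p>"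
  else if component_statuses.contains "Moderate" then "<span style=color:orange;>Moderate</span></p>"
  else "<span style=color:green;>Good</span></p>"

-- ===== PRECONDITION & SPEC =====
def Spec_check_average_air_quality (component_statuses : List String) (out : String) : Prop := out = check_average_air_quality_alt component_statuses
instance (component_statuses : List String) (out : String) : Decidable (Spec_check_average_air_quality component_statuses out) := by unfold Spec_check_average_air_quality; infer_instance

-- ===== CLAIM (what is proved, stated in full; the proofs are below) =====
def Claim_equal_check_average_air_quality : Prop := ∀ (component_statuses : List String), Dom_check_average_air_quality component_statuses → Spec_check_average_air_quality component_statuses (check_average_air_quality component_statuses)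

-- ===== LEMMAS AND PROOFS =====

lemma stepA_poor (w : Int) : pvStepA w "Poor" = 2 := by
  simp [pvStepA]

lemma stepA_mod (w : Int) (hw : w = 0 ∨ w = 1) : pvStepA w "Moderate" = 1 := by
  rcases hw with h | h <;> simp [pvStepA, h]

lemma stepA_other (w : Int) (x : String) (hp : x ≠ "Poor") (hm : x ≠ "Moderate") :
    pvStepA w x = w := by
  simp [pvStepA, hp, hm]

lemma foldl_stepA_two (xs : List String) : xs.foldl pvStepA 2 = 2 := by
  induction xs with
  | nil => rfl
  | cons y ys ih =>
    have hy : pvStepA 2 y = 2 := by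
      by_cases h1 : y = "Moderate"
      · simp [pvStepA, h1]
      · by_cases h2 : y = "Poor" <;> simp [pvStepA, h1, h2]
    simpa [hy] using ih

-- characterisation of A's fold: 2 iff 'Poor' occurs, else 1 iff 'Moderate' occurs, else the start (for starts 0 or 1)
lemma foldl_stepA_char (xs : List String) (w : Int) (hw : w = 0 ∨ w = 1) :
    xs.foldl pvStepA w =
      (if "Poor" ∈ xs then 2 else if "Moderate" ∈ xs then 1 else w) := by
  induction xs generalizing w with
  | nil => simp
  | cons x xs ih =>
    simp only [List.foldl_cons, List.mem_cons]
    by_cases hp : x = "Poor"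
    · subst hp
      rw [stepA_poor, foldl_stepA_two]
      simp
    · by_cases hm : x = "Moderate"
      · subst hm
        rw [stepA_mod w hw, ih 1 (Or.inr rfl)]
        have h1 : ¬ ("Poor" = "Moderate") := by decide
        by_cases hpin : "Poor" ∈ xs <;> simp [h1, hpin]
      · rw [stepA_other w x hp hm, ih w hw]
        have h1 : ¬ ("Poor" = x) := fun h => hp h.symm
        have h2 : ¬ ("Moderate" = x) := fun h => hm h.symm
        simp [h1, h2]

-- ===== VERDICT (by name: the statement is the Claim_ definition above) =====
theorem check_average_air_quality_spec : Claim_equal_check_average_air_quality := by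
  intro xs _
  unfold Spec_check_average_air_quality check_average_air_quality check_average_air_quality_alt
  rw [foldl_stepA_char xs 0 (Or.inl rfl)]
  by_cases hp : "Poor" ∈ xs <;> by_cases hm : "Moderate" ∈ xs <;>
    simp [hp, hm, List.contains_eq_mem]
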